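-- pv_equiv track=rewrite | github.com/cGitRep/English-or-Dutch-Classification | lab3.py | make_data
-- ===== SOURCE A (Python) =====
-- def make_data(sentences, features, labels):
--     data = []
--     i = 0
--
--     # make data for predictions
--     if not labels:
--         # check if a sentence contains a feature
--         for sentence in sentences:
--             featureArray = []
--             for feature in features:
--                 featureFound = False
--                 for word in sentence:
--                     if word == feature:
--                         featureFound = True
--                         break
--                 if featureFound:
--                     featureArray.append("True")
--                 else:
--                     featureArray.append("False")
--             # add what language the features belong to
--             data.append(featureArray)
--
--     # make data to train
--     else:
--         # check if a sentence contains a feature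
--         for sentence in sentences:
--             featureArray = []
--             for feature in features:
--                 featureFound = False
--                 for word in sentence:
--                     if word == feature:
--                         featureFound = True
--                         break
--                 if featureFound:
--                     featureArray.append("True")
--                 else:
--                     featureArray.append("False")
--             # add what language the features belong to
--             featureArray.append(labels[i])
--             data.append(featureArray)
--             i += 1
--
--     return data
-- ===== SOURCE B (Python) =====
-- def make_data(sentences, features, labels):
--     # invert the loops: build a feature -> list-of-column-indices index once,
--     # then per sentence flip a boolean presence array word by word
--     index = {}
--     for j, f in enumerate(features):
--         index.setdefault(f, []).append(j)
--     data = []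
--     for i, sentence in enumerate(sentences):
--         present = [False] * len(features)
--         for word in sentence:
--             for j in index.get(word, ()):
--                 present[j] = True
--         row = ["True" if p else "False" for p in present]
--         if labels:
--             row.append(labels[i])
--         data.append(row)
--     return data
-- ===== Notes on version B (the rewrite author's own statement) =====
-- stated objective: faster
-- what changed: Inverts the loop nesting: instead of scanning the sentence once per feature, B builds a word->column-indices dict over features once and then, per sentence, iterates over the words flipping entries of a boolean presence array, converting it to 'True'/'False' strings at the end.
import Mathlib
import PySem

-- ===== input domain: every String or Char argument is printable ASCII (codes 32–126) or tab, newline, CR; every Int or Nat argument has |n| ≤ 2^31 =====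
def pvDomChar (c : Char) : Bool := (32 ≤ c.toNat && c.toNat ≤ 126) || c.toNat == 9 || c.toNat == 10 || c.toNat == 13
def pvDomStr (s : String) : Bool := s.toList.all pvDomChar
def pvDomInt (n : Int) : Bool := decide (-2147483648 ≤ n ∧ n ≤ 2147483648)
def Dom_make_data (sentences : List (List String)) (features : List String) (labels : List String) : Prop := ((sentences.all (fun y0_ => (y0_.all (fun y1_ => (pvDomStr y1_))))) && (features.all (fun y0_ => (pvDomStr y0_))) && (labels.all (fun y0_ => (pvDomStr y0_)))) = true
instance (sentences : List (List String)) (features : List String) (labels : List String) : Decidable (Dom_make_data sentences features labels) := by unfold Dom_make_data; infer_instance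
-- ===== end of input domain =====

-- B inverts A's loop nesting: a word -> column-indices dict built once over features,
-- then per sentence the words flip a boolean presence array (objective: faster in a timing run's mechanism — fewer scans).
-- NOTE: comments claim only what is proved below.


-- ===== PORT A =====
-- the inner 'for word in sentence: … break' loop
def mdFindWord (sentence : List String) (feature : String) : Bool :=
  match sentence with
  | [] => false
  | w :: ws => if w = feature then true else mdFindWord ws feature

-- the 'for feature in features' loop building featureArray
def mdRow (sentence : List String) (features : List String) : List String :=
  features.foldl (fun arr f =>
    arr ++ [if mdFindWord sentence f then "True" else "False"]) []

def make_data (sentences : List (List String)) (features : List String) (labels : List String) : List (List String) :=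
  if labels.isEmpty then
    sentences.foldl (fun data s => data ++ [mdRow s features]) []
  else
    -- state = (data, i); labels[i] is in range under Pre_ (pyGetD total form)
    (sentences.foldl (fun (st : List (List String) × Nat) s =>
      (st.1 ++ [mdRow s features ++ [PySem.List.pyGetD labels (st.2 : Int) ""]], st.2 + 1))
      ([], 0)).1

-- ===== PORT B =====
-- index.setdefault(f, []).append(j) over enumerate(features)
def mdIndex (features : List String) : PySem.Dict String (List Nat) :=
  features.zipIdx.foldl (fun d p => d.modify p.1 [] (fun l => l ++ [p.2])) PySem.Dict.empty

-- present = [False]*len(features); for word in sentence: for j in index.get(word, ()): present[j] = True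
def mdPresent (idx : PySem.Dict String (List Nat)) (sentence : List String) (n : Nat) : List Bool :=
  sentence.foldl (fun pres w => (idx.getD w []).foldl (fun pr j => pr.set j true) pres)
    (List.replicate n false)

def make_data_alt (sentences : List (List String)) (features : List String) (labels : List String) : List (List String) :=
  let idx := mdIndex features
  sentences.zipIdx.map (fun p =>
    let row := (mdPresent idx p.1 features.length).map (fun b => if b then "True" else "False")
    if labels.isEmpty then row
    else row ++ [PySem.List.pyGetD labels (p.2 : Int) ""])

-- ===== PRECONDITION & SPEC =====
-- Pre_ excludes exactly the inputs where A raises IndexError: labels nonempty but shorter than sentences.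
def Pre_make_data (sentences : List (List String)) (_features : List String) (labels : List String) : Prop :=
  labels = [] ∨ sentences.length ≤ labels.length
instance (sentences : List (List String)) (features : List String) (labels : List String) : Decidable (Pre_make_data sentences features labels) := by unfold Pre_make_data; infer_instance

def pvWitness_make_data : List (List String) × List String × List String :=
  ([["the", "cat"], ["de", "kat"]], ["the", "de"], ["english", "dutch"])

def Spec_make_data (sentences : List (List String)) (features : List String) (labels : List String) (out : List (List String)) : Prop := out = make_data_alt sentences features labels
instance (sentences : List (List String)) (features : List String) (labels : List String) (out : List (List String)) : Decidable (Spec_make_data sentences features labels out) := by unfold Spec_make_data; infer_instance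

-- ===== CLAIM (what is proved, stated in full; the proofs are below) =====
def Claim_equal_make_data : Prop := ∀ (sentences : List (List String)) (features : List String) (labels : List String), Dom_make_data sentences features labels → Pre_make_data sentences features labels → Spec_make_data sentences features labels (make_data sentences features labels)

-- ===== LEMMAS AND PROOFS =====

-- mdIndex.getD w [] = the list of positions of w in features, in order
theorem mdIndex_getD (features : List String) (w : String) :
    (mdIndex features).getD w []
      = (features.zipIdx.filter (fun p => p.1 == w)).map (·.2) := by
  unfold mdIndex
  rw [PySem.Dict.getD_foldl_modify_append]
  simp [PySem.Dict.getD_empty]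

-- membership in the index list = that column of features equals w
theorem mdIndex_contains (features : List String) (w : String) (j : Nat) :
    ((mdIndex features).getD w []).contains j = decide (features[j]? = some w) := by
  rw [mdIndex_getD]
  simp only [List.contains_eq_mem]
  apply decide_eq_decide.mpr
  simp only [List.mem_map, List.mem_filter, beq_iff_eq]
  constructor
  · rintro ⟨⟨w', j'⟩, ⟨hmem, rfl⟩, rfl⟩
    exact List.mk_mem_zipIdx_iff_getElem?.mp hmem
  · intro h
    exact ⟨(w, j), ⟨List.mk_mem_zipIdx_iff_getElem?.mpr h, rfl⟩, rfl⟩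

-- one present[j] = True step seen through getElem?
theorem set_true_getElem? (pres : List Bool) (x j : Nat) :
    (pres.set x true)[j]? = (pres[j]?).map (fun b => b || decide (x = j)) := by
  rw [List.getElem?_set]
  by_cases hx : x = j
  · subst hx
    by_cases hj : x < pres.length
    · simp [hj]
    · have h : pres[x]? = none := List.getElem?_eq_none (by omega)
      simp [hj]
  · simp [hx]

-- the inner 'for j in index.get(word, ())' loop seen through getElem?
theorem foldSet_getElem? (L : List Nat) (pres : List Bool) (j : Nat) :
    (L.foldl (fun pr i => pr.set i true) pres)[j]?
      = (pres[j]?).map (fun b => b || L.contains j) := by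
  induction L generalizing pres with
  | nil => cases h : pres[j]? <;> simp [h]
  | cons x L ih =>
      simp only [List.foldl_cons, ih, set_true_getElem?]
      cases h : pres[j]? with
      | none => rfl
      | some b =>
          simp only [Option.map_some]
          congr 1
          simp only [List.contains_cons]
          by_cases hx : x = j
          · subst hx; simp
          · have hb : (j == x) = false := by simp [Ne.symm hx]
            simp [hb, hx]

-- the word loop over a sentence seen through getElem?
theorem mdPresentAux_getElem? (idx : PySem.Dict String (List Nat)) (s : List String)
    (pres : List Bool) (j : Nat) :
    (s.foldl (fun pres w => (idx.getD w []).foldl (fun pr i => pr.set i true) pres) pres)[j]?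
      = (pres[j]?).map (fun b => b || s.any (fun w => (idx.getD w []).contains j)) := by
  induction s generalizing pres with
  | nil => cases h : pres[j]? <;> simp [h]
  | cons w s ih =>
      simp only [List.foldl_cons, ih, foldSet_getElem?]
      cases h : pres[j]? with
      | none => rfl
      | some b => simp [Bool.or_assoc]

-- A's break-scan as an 'any'
theorem mdFindWord_any (s : List String) (f : String) :
    mdFindWord s f = s.any (fun w => decide (f = w)) := by
  induction s with
  | nil => rfl
  | cons w ws ih =>
      by_cases hw : w = f
      · subst hw; simp [mdFindWord]
      · simp [mdFindWord, hw, Ne.symm hw, ih]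

-- the row B builds equals the row A builds
theorem row_eq (s : List String) (features : List String) :
    (mdPresent (mdIndex features) s features.length).map (fun b => if b then "True" else "False")
      = mdRow s features := by
  unfold mdRow
  rw [PySem.List.foldl_append_singleton_eq_map]
  apply List.ext_getElem?
  intro j
  simp only [List.nil_append, List.getElem?_map]
  unfold mdPresent
  rw [mdPresentAux_getElem?]
  by_cases hj : j < features.length
  · rw [List.getElem?_eq_getElem (by simpa using hj), List.getElem?_eq_getElem hj]
    simp only [List.getElem_replicate, Option.map_some, Bool.false_or]
    congr 2
    rw [mdFindWord_any]
    have hfun : (fun w => ((mdIndex features).getD w []).contains j)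
        = (fun w => decide (features[j] = w)) := by
      funext w
      rw [mdIndex_contains, List.getElem?_eq_getElem hj]
      simp
    rw [hfun]
  · rw [List.getElem?_eq_none (l := List.replicate features.length false) (by simpa using not_lt.mp hj),
        List.getElem?_eq_none (by simpa using not_lt.mp hj)]
    rfl

theorem map_fst_zipIdx {α β : Type} (f : α → β) :
    ∀ (xs : List α) (i : Nat), (xs.zipIdx i).map (fun p => f p.1) = xs.map f := by
  intro xs
  induction xs with
  | nil => intro i; rfl
  | cons x xs ih => intro i; simp [List.zipIdx, ih]

-- A's labels-branch fold with counter equals the zipIdx map, for any starting index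
theorem foldl_idx_eq_map (g : List String → Nat → List String) :
    ∀ (xs : List (List String)) (acc : List (List String)) (i : Nat),
    (xs.foldl (fun (st : List (List String) × Nat) s => (st.1 ++ [g s st.2], st.2 + 1)) (acc, i)).1
      = acc ++ (xs.zipIdx i).map (fun p => g p.1 p.2) := by
  intro xs
  induction xs with
  | nil => simp
  | cons x xs ih =>
      intro acc i
      simp only [List.foldl_cons, List.zipIdx, List.map_cons, ih]
      simp

-- ===== VERDICT (by name: the statement is the Claim_ definition above) =====
theorem make_data_spec : Claim_equal_make_data := by
  intro sentences features labels _ _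
  unfold Spec_make_data make_data make_data_alt
  by_cases hl : labels.isEmpty
  · simp only [hl, if_true]
    rw [PySem.List.foldl_append_singleton_eq_map]
    rw [map_fst_zipIdx (fun s => (mdPresent (mdIndex features) s features.length).map (fun b => if b then "True" else "False"))]
    simp [row_eq]
  · simp only [hl, Bool.false_eq_true, if_false]
    rw [foldl_idx_eq_map (fun s i => mdRow s features ++ [PySem.List.pyGetD labels (i : Int) ""])]
    simp [row_eq]
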